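-- pv_equiv track=rewrite | github.com/matias725/unidad1-DMpython-MZ | monitoreo/usuarios/views.py | validate_safe_path
-- ===== SOURCE A (Python) =====
-- def validate_safe_path(path_param):
--     """Valida que el parámetro no contenga path traversal"""
--     if not path_param:
--         return True
--
--     dangerous_patterns = ['../', '..\\', '/..', '\\..', '../', '..\\']
--     path_str = str(path_param)
--
--     for pattern in dangerous_patterns:
--         if pattern in path_str:
--             return False
--     return True
-- ===== SOURCE B (Python) =====
-- def validate_safe_path(path_param):
--     """Valida que el parametro no contenga path traversal (single-pass window scan)"""
--     if not path_param:
--         return True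
--     s = str(path_param)
--     for i in range(len(s) - 2):
--         if s[i:i+3] in ('../', '..\\', '/..', '\\..'):
--             return False
--     return True
-- ===== Notes on version B (the rewrite author's own statement) =====
-- stated objective: alternative
-- what changed: Replaces the loop over six overlapping patterns, each checked with a separate substring search of the whole string, by one left-to-right pass that compares each 3-character window against the four distinct dangerous triples.
import Mathlib
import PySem

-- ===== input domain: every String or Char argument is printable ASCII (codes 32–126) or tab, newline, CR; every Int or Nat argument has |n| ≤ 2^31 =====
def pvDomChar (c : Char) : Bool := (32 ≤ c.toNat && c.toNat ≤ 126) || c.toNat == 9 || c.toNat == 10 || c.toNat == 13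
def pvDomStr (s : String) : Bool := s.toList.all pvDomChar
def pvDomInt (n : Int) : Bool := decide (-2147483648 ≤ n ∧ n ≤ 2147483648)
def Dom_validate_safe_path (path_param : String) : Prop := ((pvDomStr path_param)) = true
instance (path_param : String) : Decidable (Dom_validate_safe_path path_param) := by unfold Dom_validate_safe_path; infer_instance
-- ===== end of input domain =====

-- B replaces A's loop of six separate substring searches by one left-to-right window scan; alternative algorithm, same results.

-- ===== PORT A =====
-- the 'for pattern in dangerous_patterns: if pattern in path_str: return False' loop
def pvGoA (patterns : List String) (s : String) : Bool :=
  match patterns with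
  | [] => true
  | p :: rest => if PySem.Str.isIn p s then false else pvGoA rest s

def validate_safe_path (path_param : String) : Bool :=
  if path_param == "" then true
  else pvGoA ["../", "..\\", "/..", "\\..", "../", "..\\"] path_param

-- ===== PORT B =====
-- the 'for i in range(len(s) - 2): if s[i:i+3] in (...)' loop, as a window scan over the char list
def pvGoB (cs : List Char) : Bool :=
  match cs with
  | a :: b :: c :: rest =>
      if [a, b, c] = ['.', '.', '/'] ∨ [a, b, c] = ['.', '.', '\\'] ∨
         [a, b, c] = ['/', '.', '.'] ∨ [a, b, c] = ['\\', '.', '.'] then false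
      else pvGoB (b :: c :: rest)
  | _ => true

def validate_safe_path_alt (path_param : String) : Bool :=
  if path_param == "" then true
  else pvGoB path_param.toList

-- ===== PRECONDITION & SPEC =====
def Spec_validate_safe_path (path_param : String) (out : Bool) : Prop := out = validate_safe_path_alt path_param
instance (path_param : String) (out : Bool) : Decidable (Spec_validate_safe_path path_param out) := by unfold Spec_validate_safe_path; infer_instance

-- ===== CLAIM (what is proved, stated in full; the proofs are below) =====
def Claim_equal_validate_safe_path : Prop := ∀ (path_param : String), Dom_validate_safe_path path_param → Spec_validate_safe_path path_param (validate_safe_path path_param)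

-- ===== LEMMAS AND PROOFS =====

-- a 3-character pattern is an infix of a::l with a non-matching head window iff it is an infix of l
lemma pv_infix_step (x y z a b c : Char) (rest : List Char)
    (hne : ¬ [a, b, c] = [x, y, z]) :
    ([x, y, z] <:+: a :: b :: c :: rest) ↔ ([x, y, z] <:+: b :: c :: rest) := by
  rw [List.infix_cons_iff]
  constructor
  · rintro (hp | hi)
    · exfalso
      simp only [List.cons_prefix_cons, List.nil_prefix, and_true] at hp
      exact hne (by simp [hp.1, hp.2.1, hp.2.2])
    · exact hi
  · exact Or.inr

-- B's scan is true iff none of the four dangerous triples occurs as an infix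
lemma pvGoB_eq_true_iff : ∀ l : List Char,
    pvGoB l = true ↔
      ¬ (['.', '.', '/'] <:+: l ∨ ['.', '.', '\\'] <:+: l ∨
         ['/', '.', '.'] <:+: l ∨ ['\\', '.', '.'] <:+: l)
  | [] => by
      simp only [pvGoB, true_iff]
      rintro (h | h | h | h) <;> exact absurd h.length_le (by simp)
  | [a] => by
      simp only [pvGoB, true_iff]
      rintro (h | h | h | h) <;> exact absurd h.length_le (by simp)
  | [a, b] => by
      simp only [pvGoB, true_iff]
      rintro (h | h | h | h) <;> exact absurd h.length_le (by simp)
  | a :: b :: c :: rest => by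
      by_cases h : [a, b, c] = ['.', '.', '/'] ∨ [a, b, c] = ['.', '.', '\\'] ∨
         [a, b, c] = ['/', '.', '.'] ∨ [a, b, c] = ['\\', '.', '.']
      · simp only [pvGoB, if_pos h, Bool.false_eq_true, false_iff, not_not]
        rcases h with h | h | h | h <;>
          (injection h with ha h; injection h with hb h; injection h with hc _;
           subst ha; subst hb; subst hc)
        · exact Or.inl ⟨[], rest, rfl⟩
        · exact Or.inr (Or.inl ⟨[], rest, rfl⟩)
        · exact Or.inr (Or.inr (Or.inl ⟨[], rest, rfl⟩))
        · exact Or.inr (Or.inr (Or.inr ⟨[], rest, rfl⟩))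
      · have h1 : ¬ [a, b, c] = ['.', '.', '/'] := fun e => h (Or.inl e)
        have h2 : ¬ [a, b, c] = ['.', '.', '\\'] := fun e => h (Or.inr (Or.inl e))
        have h3 : ¬ [a, b, c] = ['/', '.', '.'] := fun e => h (Or.inr (Or.inr (Or.inl e)))
        have h4 : ¬ [a, b, c] = ['\\', '.', '.'] := fun e => h (Or.inr (Or.inr (Or.inr e)))
        simp only [pvGoB]
        rw [if_neg h, pvGoB_eq_true_iff (b :: c :: rest)]
        rw [pv_infix_step _ _ _ _ _ _ _ h1, pv_infix_step _ _ _ _ _ _ _ h2,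
            pv_infix_step _ _ _ _ _ _ _ h3, pv_infix_step _ _ _ _ _ _ _ h4]

-- A's pattern loop is true iff none of the four dangerous triples occurs as an infix
lemma pvGoA_eq_true_iff (s : String) :
    pvGoA ["../", "..\\", "/..", "\\..", "../", "..\\"] s = true ↔
      ¬ (['.', '.', '/'] <:+: s.toList ∨ ['.', '.', '\\'] <:+: s.toList ∨
         ['/', '.', '.'] <:+: s.toList ∨ ['\\', '.', '.'] <:+: s.toList) := by
  have e1 : "../".toList = ['.', '.', '/'] := by decide
  have e2 : "..\\".toList = ['.', '.', '\\'] := by decide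
  have e3 : "/..".toList = ['/', '.', '.'] := by decide
  have e4 : "\\..".toList = ['\\', '.', '.'] := by decide
  simp only [pvGoA, Bool.if_false_left, Bool.and_eq_true, Bool.not_eq_true',
    decide_eq_false_iff_not, PySem.Str.isIn_iff_infix, e1, e2, e3, e4, and_true]
  tauto

theorem validate_safe_path_spec : Claim_equal_validate_safe_path := by
  intro s _
  unfold Spec_validate_safe_path validate_safe_path validate_safe_path_alt
  by_cases hs : s == ""
  · simp [hs]
  · simp only [hs, if_false, Bool.false_eq_true]
    rw [Bool.eq_iff_iff, pvGoA_eq_true_iff, pvGoB_eq_true_iff]
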